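-- pv_equiv track=rewrite | github.com/srikrishnakaashyap/Coding_Practice | CodeSignalNumberOfChanges.py | numberOfChanges
-- ===== SOURCE A (Python) =====
-- def numberOfChanges(arr):
--
--     n = len(arr)
--
--     answer = 0
--     i = 0
--     while i < n:
--         j = i + 1
--         while j < n and arr[j].lower() == arr[i].lower():
--             j += 1
--         i = j
--         answer += 1
--
--     return answer - 1
-- ===== SOURCE B (Python) =====
-- def numberOfChanges(arr):
--     def groups(lows):
--         if len(lows) <= 1:
--             return len(lows)
--         mid = len(lows) // 2
--         left, right = lows[:mid], lows[mid:]
--         return groups(left) + groups(right) - (1 if left[-1] == right[0] else 0)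
--     return groups([s.lower() for s in arr]) - 1
-- ===== Notes on version B (the rewrite author's own statement) =====
-- stated objective: alternative
-- what changed: Replaces A's linear nested-while scan that skips over each case-insensitive run with a divide-and-conquer recursion: split the lowered list in halves, count groups in each half recursively, and subtract one when a run crosses the boundary; the empty case yields 0 groups so the -1 offset gives -1 naturally.
import Mathlib
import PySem

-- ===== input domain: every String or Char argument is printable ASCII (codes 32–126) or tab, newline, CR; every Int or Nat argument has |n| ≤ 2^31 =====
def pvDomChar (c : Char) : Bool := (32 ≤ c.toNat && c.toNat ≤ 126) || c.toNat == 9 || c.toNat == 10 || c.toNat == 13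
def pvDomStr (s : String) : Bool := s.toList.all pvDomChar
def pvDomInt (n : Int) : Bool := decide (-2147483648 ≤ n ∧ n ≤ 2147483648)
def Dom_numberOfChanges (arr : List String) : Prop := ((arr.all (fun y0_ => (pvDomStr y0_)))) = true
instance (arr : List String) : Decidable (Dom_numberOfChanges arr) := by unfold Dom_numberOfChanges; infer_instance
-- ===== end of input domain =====

-- B replaces A's linear nested-while group-skipping scan with a divide-and-conquer
-- recursion on halves of the lowered list (objective: alternative, same result).

-- ===== PORT A =====
-- inner while loop: 'while j < n and arr[j].lower() == arr[i].lower(): j += 1'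
-- (indices are in range whenever read, so getD never hits its default)
def innerA (arr : List String) (n i j : Nat) : Nat :=
  if _h : j < n ∧ PySem.Str.lower (arr.getD j "") == PySem.Str.lower (arr.getD i "") then
    innerA arr n i (j + 1)
  else j
termination_by n - j

-- used by outerA's decreasing_by (termination of the port), hence above it
theorem innerA_ge (arr : List String) (n i j : Nat) : j ≤ innerA arr n i j := by
  unfold innerA
  split
  · exact Nat.le_trans (Nat.le_succ j) (innerA_ge arr n i (j + 1))
  · exact Nat.le_refl j
termination_by n - j

-- outer while loop: state (i, answer)
def outerA (arr : List String) (n i : Nat) (answer : Int) : Int :=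
  if _h : i < n then
    outerA arr n (innerA arr n i (i + 1)) (answer + 1)
  else answer
termination_by n - i
decreasing_by
  have := innerA_ge arr n i (i + 1)
  omega

def numberOfChanges (arr : List String) : Int :=
  outerA arr arr.length 0 0 - 1

-- ===== PORT B =====
-- helper 'groups' of Source B: divide and conquer on the lowered list.
-- lows[:mid] / lows[mid:] with 0 ≤ mid ≤ len are exactly List.take / List.drop;
-- left[-1] / right[0] are read only when both halves are nonempty, as getLast? / head?.
def dcGroups (lows : List String) : Int :=
  if _h : lows.length ≤ 1 then (lows.length : Int)
  else
    let mid := lows.length / 2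
    let left := lows.take mid
    let right := lows.drop mid
    dcGroups left + dcGroups right - (if left.getLast? == right.head? then 1 else 0)
termination_by lows.length
decreasing_by
  · simp; omega
  · simp; omega

def numberOfChanges_alt (arr : List String) : Int :=
  dcGroups (arr.map PySem.Str.lower) - 1

-- ===== PRECONDITION & SPEC =====
def Spec_numberOfChanges (arr : List String) (out : Int) : Prop := out = numberOfChanges_alt arr
instance (arr : List String) (out : Int) : Decidable (Spec_numberOfChanges arr out) := by unfold Spec_numberOfChanges; infer_instance

-- ===== CLAIM (what is proved, stated in full; the proofs are below) =====
def Claim_equal_numberOfChanges : Prop := ∀ (arr : List String), Dom_numberOfChanges arr → Spec_numberOfChanges arr (numberOfChanges arr)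

-- ===== LEMMAS AND PROOFS =====

-- number of case groups of an (already lowered) list
def g : List String → Int
  | [] => 0
  | x :: xs => 1 + g (xs.dropWhile (fun y => y == x))
termination_by l => l.length
decreasing_by
  have := List.length_dropWhile_le (fun y => y == x) xs
  simp; omega

theorem g_nil : g [] = 0 := by rw [g]

theorem g_cons (x : String) (xs : List String) :
    g (x :: xs) = 1 + g (xs.dropWhile (fun y => y == x)) := by rw [g]

theorem lget (arr : List String) (j : Nat) :
    (arr.map PySem.Str.lower).getD j "" = PySem.Str.lower (arr.getD j "") := by
  induction arr generalizing j with
  | nil => simp [List.getD]; decide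
  | cons a as ih =>
    cases j with
    | zero => simp [List.getD]
    | succ k => simpa [List.getD] using ih k

theorem dropWhile_eq_drop {α : Type} (p : α → Bool) (l : List α) :
    l.dropWhile p = l.drop (l.takeWhile p).length := by
  induction l with
  | nil => simp
  | cons a as ih =>
    by_cases h : p a
    · simp [h, ih]
    · simp [h]

theorem innerA_eq (arr : List String) (i j : Nat) :
    innerA arr arr.length i j =
      j + (((arr.map PySem.Str.lower).drop j).takeWhile
            (fun y => y == PySem.Str.lower (arr.getD i ""))).length := by
  by_cases hj : j < arr.length
  · have hj' : j < (arr.map PySem.Str.lower).length := by simpa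
    have hdrop : (arr.map PySem.Str.lower).drop j =
        PySem.Str.lower (arr.getD j "") :: (arr.map PySem.Str.lower).drop (j + 1) := by
      have h1 := List.drop_eq_getElem_cons hj'
      have h2 : (arr.map PySem.Str.lower)[j]'hj' = PySem.Str.lower (arr.getD j "") := by
        rw [← lget]; simp [List.getD, List.getElem?_eq_getElem hj']
      rw [h2] at h1; exact h1
    by_cases hb : (PySem.Str.lower (arr.getD j "") == PySem.Str.lower (arr.getD i "")) = true
    · rw [innerA, dif_pos ⟨hj, hb⟩, innerA_eq arr i (j + 1), hdrop, List.takeWhile_cons, hb]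
      simp; omega
    · rw [Bool.not_eq_true] at hb
      rw [innerA, dif_neg (fun hc => absurd hc.2 (by rw [hb]; exact Bool.false_ne_true)), hdrop, List.takeWhile_cons, hb]
      simp
  · rw [innerA, dif_neg (by intro h; exact hj h.1)]
    have : (arr.map PySem.Str.lower).drop j = [] := by
      apply List.drop_eq_nil_of_le; simp; omega
    simp [this]
termination_by arr.length - j
decreasing_by omega

theorem outerA_eq (arr : List String) (i : Nat) (a : Int) :
    outerA arr arr.length i a = a + g ((arr.map PySem.Str.lower).drop i) := by
  by_cases hi : i < arr.length
  · have hi' : i < (arr.map PySem.Str.lower).length := by simpa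
    have hdrop : (arr.map PySem.Str.lower).drop i =
        PySem.Str.lower (arr.getD i "") :: (arr.map PySem.Str.lower).drop (i + 1) := by
      have h1 := List.drop_eq_getElem_cons hi'
      have h2 : (arr.map PySem.Str.lower)[i]'hi' = PySem.Str.lower (arr.getD i "") := by
        rw [← lget]; simp [List.getD, List.getElem?_eq_getElem hi']
      rw [h2] at h1; exact h1
    rw [outerA, dif_pos hi,
        outerA_eq arr (innerA arr arr.length i (i + 1)) (a + 1),
        innerA_eq arr i (i + 1), hdrop, g_cons,
        dropWhile_eq_drop, List.drop_drop]
    ring_nf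
  · rw [outerA, dif_neg hi]
    have : (arr.map PySem.Str.lower).drop i = [] := by
      apply List.drop_eq_nil_of_le; simp; omega
    rw [this, g_nil]
    ring
termination_by arr.length - i
decreasing_by
  have := innerA_ge arr arr.length i (i + 1)
  omega

theorem g_singleton (x : String) : g [x] = 1 := by
  rw [g_cons]; simp [g_nil]

-- one step of g on two explicit heads
theorem g_cons_cons (x y : String) (rest : List String) :
    g (x :: y :: rest) = (if y == x then 0 else 1) + g (y :: rest) := by
  by_cases h : (y == x) = true
  · have hxy : y = x := by simpa using h
    subst hxy
    rw [g_cons, g_cons, List.dropWhile_cons]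
    simp
  · rw [Bool.not_eq_true] at h
    rw [g_cons, List.dropWhile_cons, h]
    simp

-- splitting rule for g: a run crossing the cut is counted once
theorem g_append (a : String) (as : List String) (b : String) (bs : List String) :
    g ((a :: as) ++ b :: bs)
      = g (a :: as) + g (b :: bs) - (if (a :: as).getLast? == some b then 1 else 0) := by
  induction as generalizing a with
  | nil =>
    rw [List.cons_append, List.nil_append, g_cons_cons, g_singleton]
    by_cases hab : a = b
    · subst hab; simp
    · have h1 : (b == a) = false := beq_eq_false_iff_ne.mpr (Ne.symm hab)
      have h2 : (some a == some b) = false := by simp_all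
      simp [h1, h2]
  | cons y t ih =>
    rw [List.cons_append, List.cons_append] at *
    rw [g_cons_cons, ← List.cons_append, ih y, g_cons_cons]
    have : (a :: y :: t).getLast? = (y :: t).getLast? := by simp
    rw [this]
    ring

theorem dcGroups_eq_g (lows : List String) : dcGroups lows = g lows := by
  rw [dcGroups]
  by_cases h : lows.length ≤ 1
  · rw [dif_pos h]
    match lows, h with
    | [], _ => simp [g_nil]
    | [x], _ => simp [g_singleton]
  · rw [dif_neg h]
    show dcGroups (lows.take (lows.length / 2)) + dcGroups (lows.drop (lows.length / 2)) -
        (if (lows.take (lows.length / 2)).getLast? == (lows.drop (lows.length / 2)).head?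
          then 1 else 0) = g lows
    have hlen : 2 ≤ lows.length := by omega
    have hmid1 : 1 ≤ lows.length / 2 := by omega
    have hmid2 : lows.length / 2 < lows.length := by omega
    have hL := dcGroups_eq_g (lows.take (lows.length / 2))
    have hR := dcGroups_eq_g (lows.drop (lows.length / 2))
    cases hl : lows.take (lows.length / 2) with
    | nil =>
      exfalso
      have := congrArg List.length hl
      rw [List.length_take] at this
      simp only [List.length_nil] at this
      omega
    | cons a as =>
      cases hr : lows.drop (lows.length / 2) with
      | nil =>
        exfalso
        have := congrArg List.length hr
        rw [List.length_drop] at this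
        simp only [List.length_nil] at this
        omega
      | cons b bs =>
        rw [hl] at hL
        rw [hr] at hR
        have hsplit : lows = (a :: as) ++ b :: bs := by
          rw [← hl, ← hr, List.take_append_drop]
        rw [hL, hR]
        conv_rhs => rw [hsplit]
        rw [g_append]
        simp
termination_by lows.length
decreasing_by
  · simp; omega
  · simp; omega

-- ===== VERDICT (by name: the statement is the Claim_ definition above) =====
theorem numberOfChanges_spec : Claim_equal_numberOfChanges := by
  intro arr _
  unfold Spec_numberOfChanges numberOfChanges numberOfChanges_alt
  rw [outerA_eq arr 0 0, dcGroups_eq_g]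
  simp
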